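-- pv_equiv track=rewrite | github.com/miliar/Code_Jam_Webscraper | solutions_python/Problem_184/1588.py | remove_num
-- ===== SOURCE A (Python) =====
-- def remove_num(curr_str, num):
--     num_str = ["ZERO", "ONE", "TWO", "THREE", "FOUR",
--                "FIVE", "SIX", "SEVEN", "EIGHT", "NINE"][num]
--     new_str = curr_str
--     for c in num_str:
--         str_index = new_str.find(c)
--         if str_index == -1:
--             return (curr_str, None)
--         else:
--             new_str = new_str[:str_index] + new_str[str_index+1:]
--     return (new_str, [num])
-- ===== SOURCE B (Python) =====
-- def remove_num(curr_str, num):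
--     num_str = ["ZERO", "ONE", "TWO", "THREE", "FOUR",
--                "FIVE", "SIX", "SEVEN", "EIGHT", "NINE"][num]
--     to_skip = list(num_str)
--     kept = []
--     for ch in curr_str:
--         if ch in to_skip:
--             to_skip.remove(ch)
--         else:
--             kept.append(ch)
--     if to_skip:
--         return (curr_str, None)
--     return (''.join(kept), [num])
-- ===== Notes on version B (the rewrite author's own statement) =====
-- stated objective: simpler
-- what changed: Instead of repeatedly searching the string with find and rebuilding it by slice concatenation once per spelled-digit letter, B makes a single left-to-right pass over curr_str, skipping each character still owed to a multiset (list) of the spelled word's letters and keeping the rest; leftover letters mean failure.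
import Mathlib
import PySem

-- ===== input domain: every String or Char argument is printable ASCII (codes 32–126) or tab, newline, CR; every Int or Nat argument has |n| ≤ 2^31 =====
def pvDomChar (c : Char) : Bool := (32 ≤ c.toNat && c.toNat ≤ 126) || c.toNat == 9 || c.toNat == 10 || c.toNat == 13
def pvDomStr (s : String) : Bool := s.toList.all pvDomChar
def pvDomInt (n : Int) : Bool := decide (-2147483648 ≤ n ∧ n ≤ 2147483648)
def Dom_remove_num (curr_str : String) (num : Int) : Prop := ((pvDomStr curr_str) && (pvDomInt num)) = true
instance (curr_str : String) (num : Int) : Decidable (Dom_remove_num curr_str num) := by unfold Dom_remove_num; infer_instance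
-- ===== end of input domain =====

-- B replaces A's per-letter find + slice-concatenation rebuilding with one left-to-right
-- pass over curr_str that skips characters still owed to a multiset of the word's letters
-- (objective: simpler). Return value only; neither program mutates its arguments.

-- ===== PORT A =====
def pvNumWords : List (List Char) :=
  ["ZERO".toList, "ONE".toList, "TWO".toList, "THREE".toList, "FOUR".toList,
   "FIVE".toList, "SIX".toList, "SEVEN".toList, "EIGHT".toList, "NINE".toList]

/-- A's loop: for c in num_str: find c, fail on -1, else splice it out. -/
def pvRemoveLoopA : List Char → List Char → Option (List Char)
  | [], s => some s
  | c :: rest, s =>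
    let str_index := PySem.Chars.find s [c]
    if str_index = -1 then none
    else pvRemoveLoopA rest
      (PySem.List.slice s none (some str_index) ++
       PySem.List.slice s (some (str_index + 1)) none)

def remove_num (curr_str : String) (num : Int) : String × Option (List Int) :=
  match PySem.List.pyGet? pvNumWords num with
  | none => (curr_str, none)    -- Python raises IndexError here; outside Pre_
  | some num_str =>
    match pvRemoveLoopA num_str curr_str.toList with
    | none => (curr_str, none)
    | some new_str => (String.ofList new_str, some [num])

-- ===== PORT B =====
/-- B's single pass: skip ch if still owed (remove it from to_skip), else keep it. -/
def pvScanB : List Char → List Char → List Char → List Char × List Char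
  | [], to_skip, kept => (to_skip, kept)
  | ch :: rest, to_skip, kept =>
    if ch ∈ to_skip then pvScanB rest (to_skip.erase ch) kept
    else pvScanB rest to_skip (kept ++ [ch])

def remove_num_alt (curr_str : String) (num : Int) : String × Option (List Int) :=
  match PySem.List.pyGet? pvNumWords num with
  | none => (curr_str, none)    -- Python raises IndexError here; outside Pre_
  | some num_str =>
    if (pvScanB curr_str.toList num_str []).1 ≠ [] then (curr_str, none)
    else (String.ofList (pvScanB curr_str.toList num_str []).2, some [num])

-- ===== PRECONDITION & SPEC =====
-- Pre_ excludes exactly the num values (outside -10..9) where the list indexing raises IndexError.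
def Pre_remove_num (curr_str : String) (num : Int) : Prop := -10 ≤ num ∧ num ≤ 9
instance (curr_str : String) (num : Int) : Decidable (Pre_remove_num curr_str num) := by unfold Pre_remove_num; infer_instance
def pvWitness_remove_num : String × Int := ("ATHREEB", 3)

def Spec_remove_num (curr_str : String) (num : Int) (out : String × Option (List Int)) : Prop := out = remove_num_alt curr_str num
instance (curr_str : String) (num : Int) (out : String × Option (List Int)) : Decidable (Spec_remove_num curr_str num out) := by unfold Spec_remove_num; infer_instance

-- ===== CLAIM (what is proved, stated in full; the proofs are below) =====
def Claim_equal_remove_num : Prop := ∀ (curr_str : String) (num : Int), Dom_remove_num curr_str num → Pre_remove_num curr_str num → Spec_remove_num curr_str num (remove_num curr_str num)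

-- ===== LEMMAS AND PROOFS =====

/-- One char is an infix iff it is a member. -/
lemma pv_singleton_infix_iff (c : Char) (s : List Char) : [c] <:+: s ↔ c ∈ s := by
  constructor
  · intro h; exact h.subset (List.mem_singleton_self c)
  · intro h
    obtain ⟨l₁, l₂, rfl⟩ := List.append_of_mem h
    exact ⟨l₁, l₂, by simp⟩

/-- A's find of a single char fails exactly when the char is absent. -/
lemma pv_find_singleton_eq_neg_one_iff (s : List Char) (c : Char) :
    PySem.Chars.find s [c] = -1 ↔ c ∉ s := by
  rw [PySem.Chars.find_eq_neg_one_iff, pv_singleton_infix_iff]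

/-- A's splice at the found index removes the first occurrence. -/
lemma pv_splice_eq_erase (s : List Char) (c : Char)
    (h : PySem.Chars.find s [c] ≠ -1) :
    PySem.List.slice s none (some (PySem.Chars.find s [c])) ++
      PySem.List.slice s (some (PySem.Chars.find s [c] + 1)) none = s.erase c := by
  have hnn : 0 ≤ PySem.Chars.find s [c] := by
    have := PySem.Chars.neg_one_le_find (s := s) (sub := [c])
    omega
  obtain ⟨hpre, hmin⟩ := PySem.Chars.find_spec (s := s) (sub := [c]) hnn
  set n : Nat := (PySem.Chars.find s [c]).toNat with hn
  obtain ⟨t, ht⟩ := hpre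
  have hdrop : s.drop n = c :: t := by simpa using ht.symm
  have h1 : s.drop (n + 1) = t := by
    rw [← List.tail_drop, hdrop, List.tail_cons]
  have hlt : n < s.length := by
    by_contra hge
    have hnil : s.drop n = [] := List.drop_eq_nil_of_le (by omega)
    rw [hnil] at hdrop
    simp at hdrop
  have hsplit : s = s.take n ++ c :: s.drop (n + 1) := by
    rw [h1, ← hdrop, List.take_append_drop]
  have hnotin : c ∉ s.take n := by
    intro hc
    obtain ⟨j, hj, hjc⟩ := List.mem_take_iff_getElem.mp hc
    have hjn : j < n := lt_of_lt_of_le hj (by omega)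
    refine hmin j hjn ⟨s.drop (j + 1), ?_⟩
    have hdj : s.drop j = s[j] :: s.drop (j + 1) := by
      rw [List.drop_eq_getElem_cons (by omega)]
    rw [hdj, hjc]
    rfl
  have hslice1 : PySem.List.slice s none (some (PySem.Chars.find s [c])) = s.take n := by
    rw [PySem.List.slice_to _ hnn]
  have hslice2 : PySem.List.slice s (some (PySem.Chars.find s [c] + 1)) none = s.drop (n + 1) := by
    rw [PySem.List.slice_from _ (by omega)]
    congr 1
    omega
  rw [hslice1, hslice2]
  conv_rhs => rw [hsplit]
  rw [List.erase_append_right _ hnotin, List.erase_cons_head]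

/-- Empty skip list: the scan keeps everything. -/
lemma pvScanB_nil_skip (s kept : List Char) : pvScanB s [] kept = ([], kept ++ s) := by
  induction s generalizing kept with
  | nil => simp [pvScanB]
  | cons ch rest ih => simp [pvScanB, ih]

/-- Key step: owing one more c (present in s) is the same as scanning s with its first c removed. -/
lemma pvScanB_cons_skip (s : List Char) (c : Char) (skip kept : List Char) (hc : c ∈ s) :
    pvScanB s (c :: skip) kept = pvScanB (s.erase c) skip kept := by
  induction s generalizing skip kept with
  | nil => cases hc
  | cons ch rest ih =>
    by_cases hch : ch = c
    · subst hch
      simp [pvScanB, List.erase_cons_head]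
    · have hne : c ≠ ch := fun h => hch h.symm
      have hc' : c ∈ rest := by
        cases hc with
        | head => exact absurd rfl hch
        | tail _ h => exact h
      rw [List.erase_cons_tail (by simp [hch])]
      by_cases hmem : ch ∈ skip
      · have hm2 : ch ∈ c :: skip := List.mem_cons_of_mem _ hmem
        rw [pvScanB, if_pos hm2, List.erase_cons_tail (by simp [hne]),
            ih _ _ hc', pvScanB, if_pos hmem]
      · have hm2 : ch ∉ c :: skip := by
          intro h
          cases h with
          | head => exact hch rfl
          | tail _ h => exact hmem h
        rw [pvScanB, if_neg hm2, ih _ _ hc', pvScanB, if_neg hmem]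

/-- A letter owed but absent from s survives the scan. -/
lemma pvScanB_mem_of_not_mem (s : List Char) (skip kept : List Char) (c : Char)
    (hcs : c ∉ s) (hck : c ∈ skip) : c ∈ (pvScanB s skip kept).1 := by
  induction s generalizing skip kept with
  | nil => simpa [pvScanB] using hck
  | cons ch rest ih =>
    have hne : ch ≠ c := fun h => hcs (h ▸ List.mem_cons_self)
    have hcs' : c ∉ rest := fun h => hcs (List.mem_cons_of_mem _ h)
    rw [pvScanB]
    split_ifs with hmem
    · exact ih _ _ hcs' ((List.mem_erase_of_ne (fun h => hne h.symm)).mpr hck)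
    · exact ih _ _ hcs' hck

/-- Main invariant tying A's loop to B's scan. -/
lemma pv_main (w : List Char) : ∀ (s kept : List Char),
    (pvRemoveLoopA w s = none → (pvScanB s w kept).1 ≠ []) ∧
    (∀ t, pvRemoveLoopA w s = some t → pvScanB s w kept = ([], kept ++ t)) := by
  induction w with
  | nil =>
    intro s kept
    constructor
    · intro h; simp [pvRemoveLoopA] at h
    · intro t ht
      simp only [pvRemoveLoopA, Option.some.injEq] at ht
      rw [pvScanB_nil_skip, ht]
  | cons c rest ih =>
    intro s kept
    by_cases hc : c ∈ s
    · have hfind : PySem.Chars.find s [c] ≠ -1 := by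
        rw [ne_eq, pv_find_singleton_eq_neg_one_iff]; simpa using hc
      have hstep : pvRemoveLoopA (c :: rest) s = pvRemoveLoopA rest (s.erase c) := by
        rw [pvRemoveLoopA]
        simp only [if_neg hfind, pv_splice_eq_erase s c hfind]
      rw [hstep, pvScanB_cons_skip s c rest kept hc]
      exact ih (s.erase c) kept
    · have hfind : PySem.Chars.find s [c] = -1 := by
        rw [pv_find_singleton_eq_neg_one_iff]; exact hc
      have hstep : pvRemoveLoopA (c :: rest) s = none := by
        rw [pvRemoveLoopA]; simp [hfind]
      constructor
      · intro _ hempty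
        have := pvScanB_mem_of_not_mem s (c :: rest) kept c hc List.mem_cons_self
        rw [hempty] at this
        cases this
      · intro t ht
        rw [hstep] at ht
        simp at ht

-- ===== VERDICT (by name: the statement is the Claim_ definition above) =====
theorem remove_num_spec : Claim_equal_remove_num := by
  intro curr_str num _ _
  unfold Spec_remove_num remove_num remove_num_alt
  cases hget : PySem.List.pyGet? pvNumWords num with
  | none => rfl
  | some w =>
    obtain ⟨hnone, hsome⟩ := pv_main w curr_str.toList []
    cases hA : pvRemoveLoopA w curr_str.toList with
    | none =>
      have h1 := hnone hA
      simp [hA, h1]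
    | some t =>
      have h2 := hsome t hA
      simp [hA, h2]
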